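-- pv_equiv track=rewrite | github.com/LeonorMendesa107284/ATP2024 | TP7/tpc7.py | maxPeriodoCalor
-- ===== SOURCE A (Python) =====
-- def maxPeriodoCalor(TabMeteo, p):
--     num_consec=0
--     consec_global=0
--     for data, min, max, prec in TabMeteo:
--         if prec<p:
--             num_consec = num_consec +1
--         else:
--             if num_consec> consec_global:
--                 consec_global= num_consec
--             num_consec=0
--     if num_consec> consec_global:
--         consec_global= num_consec
--     return consec_global
-- ===== SOURCE B (Python) =====
-- def maxPeriodoCalor(TabMeteo, p):
--     n = len(TabMeteo)
--     bad = [i for i, (_, _, _, prec) in enumerate(TabMeteo) if prec >= p]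
--     bounds = [-1] + bad + [n]
--     return max(b - a - 1 for a, b in zip(bounds, bounds[1:]))
-- ===== Notes on version B (the rewrite author's own statement) =====
-- stated objective: alternative
-- what changed: Instead of A's running counter with a trailing flush, B collects the indices of blocking days (prec >= p), brackets them with sentinels -1 and len(TabMeteo), and returns the maximum gap between consecutive boundaries, which is exactly the longest low-precipitation run.
import Mathlib
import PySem

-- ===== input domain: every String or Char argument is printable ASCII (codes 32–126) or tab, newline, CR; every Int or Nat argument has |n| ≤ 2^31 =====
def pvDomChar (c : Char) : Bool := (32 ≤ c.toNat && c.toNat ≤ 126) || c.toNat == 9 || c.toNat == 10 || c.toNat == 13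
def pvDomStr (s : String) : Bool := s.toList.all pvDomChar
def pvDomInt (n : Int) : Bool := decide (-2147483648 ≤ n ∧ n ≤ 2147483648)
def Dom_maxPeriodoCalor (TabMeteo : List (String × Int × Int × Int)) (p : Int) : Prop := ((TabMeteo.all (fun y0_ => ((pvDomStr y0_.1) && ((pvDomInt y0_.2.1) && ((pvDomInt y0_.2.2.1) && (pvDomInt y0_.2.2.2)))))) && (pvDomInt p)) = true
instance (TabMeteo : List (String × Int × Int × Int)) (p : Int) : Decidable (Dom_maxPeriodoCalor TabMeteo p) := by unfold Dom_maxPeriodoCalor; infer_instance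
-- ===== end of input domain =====

-- B computes the longest low-precipitation run from the positions of the blocking days
-- (gaps between consecutive indices with prec >= p), instead of A's running counter; objective: alternative.


-- ===== PORT A =====
def maxPeriodoCalor (TabMeteo : List (String × Int × Int × Int)) (p : Int) : Int :=
  let s := TabMeteo.foldl
    (fun (st : Int × Int) d =>
      if d.2.2.2 < p then (st.1 + 1, st.2)
      else (0, if st.1 > st.2 then st.1 else st.2))
    (0, 0)
  if s.1 > s.2 then s.1 else s.2

-- ===== PORT B =====
def maxPeriodoCalor_alt (TabMeteo : List (String × Int × Int × Int)) (p : Int) : Int :=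
  let n : Int := TabMeteo.length
  let bad : List Int :=
    ((PySem.List.enumerate TabMeteo 0).filter (fun x => decide (p ≤ x.2.2.2.2))).map (fun x => x.1)
  let bounds : List Int := -1 :: (bad ++ [n])
  match (bounds.zip (bounds.drop 1)).map (fun ab => ab.2 - ab.1 - 1) with
  | [] => 0  -- unreachable (bounds always has ≥ 2 elements); guard only makes the match total
  | g :: gs => gs.foldl max g

-- ===== PRECONDITION & SPEC =====
def Spec_maxPeriodoCalor (TabMeteo : List (String × Int × Int × Int)) (p : Int) (out : Int) : Prop := out = maxPeriodoCalor_alt TabMeteo p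
instance (TabMeteo : List (String × Int × Int × Int)) (p : Int) (out : Int) : Decidable (Spec_maxPeriodoCalor TabMeteo p out) := by unfold Spec_maxPeriodoCalor; infer_instance

-- ===== CLAIM (what is proved, stated in full; the proofs are below) =====
def Claim_equal_maxPeriodoCalor : Prop := ∀ (TabMeteo : List (String × Int × Int × Int)) (p : Int), Dom_maxPeriodoCalor TabMeteo p → Spec_maxPeriodoCalor TabMeteo p (maxPeriodoCalor TabMeteo p)

-- ===== LEMMAS AND PROOFS =====

-- A's running counter, abstracted to the list of "low-precip day" flags
def pvM : List Bool → Int → Int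
  | [], c => c
  | b :: fs, c => if b then pvM fs (c + 1) else max c (pvM fs 0)

-- the run lengths: head = length of the first run, tail = lengths of the later runs
def pvSeg : List Bool → Int × List Int
  | [] => (0, [])
  | b :: fs => let s := pvSeg fs; if b then (s.1 + 1, s.2) else (0, s.1 :: s.2)

-- indices (from offset o) of the blocking days
def pvBad : List Bool → Int → List Int
  | [], _ => []
  | b :: fs, o => if b then pvBad fs (o + 1) else o :: pvBad fs (o + 1)

-- gaps between consecutive bounds
def pvGaps : Int → List Int → List Int
  | _, [] => []
  | a, b :: bs => (b - a - 1) :: pvGaps b bs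

theorem pv_foldl_max_max (l : List Int) (a b : Int) :
    l.foldl max (max a b) = max a (l.foldl max b) := by
  induction l generalizing a b with
  | nil => simp
  | cons x l ih => simp only [List.foldl]; rw [max_assoc, ih]

theorem pv_le_foldl_max (l : List Int) (a : Int) : a ≤ l.foldl max a := by
  induction l generalizing a with
  | nil => simp
  | cons x l ih => exact le_trans (le_max_left a x) (ih _)

theorem pv_seg_head_nonneg (fs : List Bool) : 0 ≤ (pvSeg fs).1 := by
  induction fs with
  | nil => simp [pvSeg]
  | cons b fs ih => cases b <;> simp [pvSeg] <;> omega

theorem pv_M_eq (fs : List Bool) : ∀ c : Int, pvM fs c = (pvSeg fs).2.foldl max (c + (pvSeg fs).1) := by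
  induction fs with
  | nil => intro c; simp [pvM, pvSeg]
  | cons b fs ih =>
    intro c
    cases b with
    | true =>
      rw [show pvM (true :: fs) c = pvM fs (c + 1) from rfl, ih,
        show pvSeg (true :: fs) = ((pvSeg fs).1 + 1, (pvSeg fs).2) from rfl]
      congr 1; ring
    | false =>
      rw [show pvM (false :: fs) c = max c (pvM fs 0) from rfl, ih 0,
        show pvSeg (false :: fs) = (0, (pvSeg fs).1 :: (pvSeg fs).2) from rfl]
      simp only [List.foldl, add_zero, zero_add]
      rw [pv_foldl_max_max]

theorem pv_A_eq (p : Int) (t : List (String × Int × Int × Int)) :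
    ∀ c g : Int,
      (if (t.foldl
            (fun (st : Int × Int) d =>
              if d.2.2.2 < p then (st.1 + 1, st.2)
              else (0, if st.1 > st.2 then st.1 else st.2)) (c, g)).1 >
          (t.foldl
            (fun (st : Int × Int) d =>
              if d.2.2.2 < p then (st.1 + 1, st.2)
              else (0, if st.1 > st.2 then st.1 else st.2)) (c, g)).2
       then (t.foldl
            (fun (st : Int × Int) d =>
              if d.2.2.2 < p then (st.1 + 1, st.2)
              else (0, if st.1 > st.2 then st.1 else st.2)) (c, g)).1
       else (t.foldl
            (fun (st : Int × Int) d =>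
              if d.2.2.2 < p then (st.1 + 1, st.2)
              else (0, if st.1 > st.2 then st.1 else st.2)) (c, g)).2)
      = max g (pvM (t.map (fun d => decide (d.2.2.2 < p))) c) := by
  induction t with
  | nil =>
    intro c g
    simp only [List.foldl, List.map, pvM]
    split_ifs with h
    · omega
    · omega
  | cons d t ih =>
    intro c g
    by_cases h : d.2.2.2 < p
    · simp only [List.foldl, List.map, h, decide_true, pvM, if_true]
      exact ih (c + 1) g
    · simp only [List.foldl, List.map, h, decide_false, pvM, Bool.false_eq_true, if_false]
      rw [ih 0 (if c > g then c else g)]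
      rcases le_or_gt (pvM (t.map (fun d => decide (d.2.2.2 < p))) 0) c with hm | hm <;>
        split_ifs with hcg <;> omega

theorem pv_bad_eq (p : Int) (t : List (String × Int × Int × Int)) :
    ∀ o : Int,
      ((PySem.List.enumerate t o).filter (fun x => decide (p ≤ x.2.2.2.2))).map (fun x => x.1)
      = pvBad (t.map (fun d => decide (d.2.2.2 < p))) o := by
  induction t with
  | nil => intro o; simp [PySem.List.enumerate_nil, pvBad]
  | cons d t ih =>
    intro o
    by_cases h : d.2.2.2 < p
    · simp [PySem.List.enumerate_cons, not_le.mpr h, h, pvBad, ih]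
    · simp [PySem.List.enumerate_cons, not_lt.mp h, h, pvBad, ih]

theorem pv_zip_gaps (rest : List Int) : ∀ a : Int,
    (((a :: rest).zip ((a :: rest).drop 1)).map (fun ab => ab.2 - ab.1 - 1)) = pvGaps a rest := by
  induction rest with
  | nil => intro a; simp [pvGaps]
  | cons b bs ih =>
    intro a
    simp only [List.drop, List.zip_cons_cons, List.map, pvGaps]
    rw [← ih b]
    simp

theorem pv_gaps_eq (fs : List Bool) : ∀ o a : Int,
    pvGaps a (pvBad fs o ++ [o + fs.length]) = (o - a - 1 + (pvSeg fs).1) :: (pvSeg fs).2 := by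
  induction fs with
  | nil => intro o a; simp [pvBad, pvGaps, pvSeg]
  | cons b fs ih =>
    intro o a
    cases b with
    | true =>
      rw [show pvBad (true :: fs) o = pvBad fs (o + 1) from rfl,
        show pvSeg (true :: fs) = ((pvSeg fs).1 + 1, (pvSeg fs).2) from rfl,
        show (o + ((true :: fs).length : Int)) = (o + 1) + fs.length from by simp; ring,
        ih (o + 1) a]
      simp only [List.cons.injEq]
      exact ⟨by ring, trivial⟩
    | false =>
      rw [show pvBad (false :: fs) o = o :: pvBad fs (o + 1) from rfl,
        show pvSeg (false :: fs) = (0, (pvSeg fs).1 :: (pvSeg fs).2) from rfl,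
        show (o + ((false :: fs).length : Int)) = (o + 1) + fs.length from by simp; ring]
      rw [show (o :: pvBad fs (o + 1)) ++ [(o + 1) + (fs.length : Int)]
            = o :: (pvBad fs (o + 1) ++ [(o + 1) + (fs.length : Int)]) from rfl,
        show pvGaps a (o :: (pvBad fs (o + 1) ++ [(o + 1) + (fs.length : Int)]))
            = (o - a - 1) :: pvGaps o (pvBad fs (o + 1) ++ [(o + 1) + (fs.length : Int)]) from rfl,
        ih (o + 1) o]
      simp only [List.cons.injEq]
      exact ⟨by ring, by ring, trivial⟩

-- ===== VERDICT (by name: the statement is the Claim_ definition above) =====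
theorem maxPeriodoCalor_spec : Claim_equal_maxPeriodoCalor := by
  intro t p _
  unfold Spec_maxPeriodoCalor maxPeriodoCalor maxPeriodoCalor_alt
  simp only []
  rw [pv_A_eq p t 0 0, pv_M_eq, pv_bad_eq p t 0, pv_zip_gaps,
    show ((t.length : Int)) = 0 + ((t.map (fun d => decide (d.2.2.2 < p))).length : Int) from by
      simp,
    pv_gaps_eq]
  simp only [zero_add]
  rw [show (0 : Int) - (-1) - 1 + (pvSeg (t.map (fun d => decide (d.2.2.2 < p)))).1
      = (pvSeg (t.map (fun d => decide (d.2.2.2 < p)))).1 from by ring]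
  rw [max_eq_right (le_trans (pv_seg_head_nonneg _) (pv_le_foldl_max _ _))]
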